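-- pv_equiv track=rewrite | github.com/fabiano77/Algorithm_Practice | BOJ/2110.py | solve
-- ===== SOURCE A (Python) =====
-- import bisect
--
-- def solve(data, c):
--     start = 0
--     end = data[-1] - data[0]
--     ans = 0
--     while start <= end:
--         middle = (start+end)//2
--         rightest = 0
--         for _ in range(c-1):
--             rightest = bisect.bisect_left(data, data[rightest]+middle, lo = rightest)
--             if rightest >= len(data):
--                 break
--         if rightest >= len(data):
--             end = middle - 1
--         else:
--             ans = middle
--             start = middle + 1
--     return ans
-- ===== SOURCE B (Python) =====
-- def solve(data, c):
--     lo, hi = 0, data[-1] - data[0]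
--     ans = 0
--     while lo <= hi:
--         m = (lo + hi) // 2
--         # greedy linear feasibility scan: how many routers fit with min gap m
--         cnt, last = 1, data[0]
--         for x in data[1:]:
--             if x - last >= m:
--                 cnt += 1
--                 last = x
--         if cnt >= c:
--             ans = m
--             lo = m + 1
--         else:
--             hi = m - 1
--     return ans
-- ===== Notes on version B (the rewrite author's own statement) =====
-- stated objective: alternative
-- what changed: Replaces A's feasibility test per binary-search midpoint (a chain of c-1 bisect_left jumps) with a single linear greedy scan that counts how many routers fit with the candidate gap.
-- outside the precondition, e.g. on solve([-3, -2, -3, -1], 3): A returns 0, B returns 1; on solve([], 2): A raises IndexError, B raises IndexError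
import Mathlib
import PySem

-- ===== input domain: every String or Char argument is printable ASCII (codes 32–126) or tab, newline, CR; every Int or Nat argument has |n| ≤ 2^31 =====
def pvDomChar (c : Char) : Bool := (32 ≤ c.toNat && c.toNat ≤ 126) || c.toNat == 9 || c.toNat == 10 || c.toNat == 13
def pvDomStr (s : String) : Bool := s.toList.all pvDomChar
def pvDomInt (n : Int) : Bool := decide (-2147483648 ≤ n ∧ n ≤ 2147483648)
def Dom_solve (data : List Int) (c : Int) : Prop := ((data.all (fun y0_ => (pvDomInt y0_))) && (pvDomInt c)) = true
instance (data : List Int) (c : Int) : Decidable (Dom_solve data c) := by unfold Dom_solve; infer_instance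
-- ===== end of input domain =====

-- B replaces A's per-midpoint chain of c-1 bisect_left jumps by a single linear greedy
-- feasibility scan over the (sorted) list; equivalence is claimed for sorted, nonempty input.

-- ===== PORT A =====

-- Python's bisect.bisect_left(data, x, lo) with hi = len(data); a[mid] is always in range here.
-- the fuel is the search-interval width, which shrinks every step, so it never runs out
def bisectLeft (data : List Int) (x : Int) : Nat → Int → Int → Int
  | 0, lo, _ => lo
  | fuel + 1, lo, hi =>
    if lo < hi then
      let mid := PySem.Int.floordiv (lo + hi) 2
      if PySem.List.pyGetD data mid 0 < x then bisectLeft data x fuel (mid + 1) hi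
      else bisectLeft data x fuel lo mid
    else lo

-- the inner 'for _ in range(c-1)' loop of A: repeated bisect jumps, break once past the end
def chaseA (data : List Int) (middle : Int) : Nat → Int → Int
  | 0, r => r
  | fuel + 1, r =>
    let r' := bisectLeft data (PySem.List.pyGetD data r 0 + middle)
      ((data.length : Int) - r).toNat r (data.length : Int)
    if (data.length : Int) ≤ r' then r' else chaseA data middle fuel r'

-- A's outer 'while start <= end' binary search; fuel = interval width + 1, shrinking every step
def loopA (data : List Int) (c : Int) : Nat → Int → Int → Int → Int
  | 0, _, _, ans => ans
  | fuel + 1, start, end_, ans =>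
    if start ≤ end_ then
      let middle := PySem.Int.floordiv (start + end_) 2
      let rightest := chaseA data middle (c - 1).toNat 0
      if (data.length : Int) ≤ rightest then loopA data c fuel start (middle - 1) ans
      else loopA data c fuel (middle + 1) end_ middle
    else ans

def solve (data : List Int) (c : Int) : Int :=
  let start : Int := 0
  let end_ : Int := (PySem.List.pyGet? data (-1)).getD 0 - (PySem.List.pyGet? data 0).getD 0
  loopA data c (end_ + 1 - start).toNat start end_ 0

-- ===== PORT B =====

-- the greedy scan 'for x in data[1:]' of B: count routers placed with min gap m
def greedyB (m : Int) : List Int → Int → Int → Int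
  | [], _, cnt => cnt
  | x :: xs, last, cnt =>
    if m ≤ x - last then greedyB m xs x (cnt + 1) else greedyB m xs last cnt

def countB (data : List Int) (m : Int) : Int :=
  greedyB m (PySem.List.slice data (some 1) none) ((PySem.List.pyGet? data 0).getD 0) 1

-- B's 'while lo <= hi' binary search; fuel = interval width + 1, shrinking every step
def loopB (data : List Int) (c : Int) : Nat → Int → Int → Int → Int
  | 0, _, _, ans => ans
  | fuel + 1, lo, hi, ans =>
    if lo ≤ hi then
      let m := PySem.Int.floordiv (lo + hi) 2
      if c ≤ countB data m then loopB data c fuel (m + 1) hi m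
      else loopB data c fuel lo (m - 1) ans
    else ans

def solve_alt (data : List Int) (c : Int) : Int :=
  let hi : Int := (PySem.List.pyGet? data (-1)).getD 0 - (PySem.List.pyGet? data 0).getD 0
  loopB data c (hi + 1 - 0).toNat 0 hi 0

-- ===== PRECONDITION & SPEC =====
-- Pre_ excludes the empty list (A's data[-1] raises IndexError, and B raises there too) and
-- unsorted input with data[0] <= data[-1], on which bisect_left's partition point over unordered
-- data is an artefact of A's binary search (the function is specified for sorted coordinates;
-- unsorted input with data[-1] < data[0] stays admitted: neither loop ever runs).
def Pre_solve (data : List Int) (c : Int) : Prop :=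
  data ≠ [] ∧ (List.Pairwise (· ≤ ·) data ∨
    (PySem.List.pyGet? data (-1)).getD 0 < (PySem.List.pyGet? data 0).getD 0)
instance (data : List Int) (c : Int) : Decidable (Pre_solve data c) := by
  unfold Pre_solve; infer_instance

def pvWitness_solve : List Int × Int := ([1, 2, 4, 8, 9], 3)

def Spec_solve (data : List Int) (c : Int) (out : Int) : Prop := out = solve_alt data c
instance (data : List Int) (c : Int) (out : Int) : Decidable (Spec_solve data c out) := by unfold Spec_solve; infer_instance

-- ===== CLAIM (what is proved, stated in full; the proofs are below) =====
def Claim_equal_solve : Prop := ∀ (data : List Int) (c : Int), Dom_solve data c → Pre_solve data c → Spec_solve data c (solve data c)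

-- ===== LEMMAS AND PROOFS =====

-- sorted access: data.getD is monotone in the index (within range)
def Mono (data : List Int) : Prop :=
  ∀ i j : Nat, i ≤ j → j < data.length → data.getD i 0 ≤ data.getD j 0

theorem mono_of_pairwise (data : List Int) (hs : List.Pairwise (· ≤ ·) data) : Mono data := by
  intro i j hij hj
  rcases Nat.eq_or_lt_of_le hij with rfl | hlt
  · exact le_refl _
  · have hi : i < data.length := lt_trans hlt hj
    rw [List.getD_eq_getElem data 0 hi, List.getD_eq_getElem data 0 hj]
    exact List.pairwise_iff_getElem.mp hs i j hi hj hlt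

-- a total-index view of pyGetD inside the admitted range
theorem pyGetD_getD (data : List Int) (i : Int) (h1 : 0 ≤ i) (h2 : i < (data.length : Int)) :
    PySem.List.pyGetD data i 0 = data.getD i.toNat 0 := by
  rw [PySem.List.pyGetD_eq_getElem data 0 h1 h2, List.getD_eq_getElem data 0 (by omega)]

-- Python bisect_left on a sorted list: the partition point (any sufficient fuel)
theorem bl_spec (data : List Int) (x : Int) (hm : Mono data) :
    ∀ (fuel : Nat) (lo hi : Int), (hi - lo).toNat ≤ fuel →
    0 ≤ lo → hi ≤ (data.length : Int) → lo ≤ hi →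
    lo ≤ bisectLeft data x fuel lo hi ∧ bisectLeft data x fuel lo hi ≤ hi ∧
    (∀ k : Nat, lo ≤ (k : Int) → (k : Int) < bisectLeft data x fuel lo hi → data.getD k 0 < x) ∧
    (bisectLeft data x fuel lo hi < hi → x ≤ data.getD (bisectLeft data x fuel lo hi).toNat 0) := by
  intro fuel
  induction fuel with
  | zero =>
    intro lo hi hf h0 hh hlh
    have : lo = hi := by omega
    subst this
    simp only [bisectLeft]
    exact ⟨le_refl lo, le_refl lo, fun k hk1 hk2 => absurd hk2 (by omega),
      fun h => absurd h (by omega)⟩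
  | succ fuel IH =>
    intro lo hi hf h0 hh hlh
    simp only [bisectLeft]
    by_cases hlt : lo < hi
    · rw [if_pos hlt]
      have hmid : PySem.Int.floordiv (lo + hi) 2 = (lo + hi) / 2 :=
        PySem.Int.floordiv_eq_ediv_of_pos (by omega)
      set mid := PySem.Int.floordiv (lo + hi) 2 with hmiddef
      have hb1 : lo ≤ mid := by omega
      have hb2 : mid < hi := by omega
      have hget : PySem.List.pyGetD data mid 0 = data.getD mid.toNat 0 :=
        pyGetD_getD data mid (by omega) (by omega)
      by_cases hcmp : PySem.List.pyGetD data mid 0 < x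
      · rw [if_pos hcmp]
        obtain ⟨p1, p2, p3, p4⟩ := IH (mid + 1) hi (by omega) (by omega) hh (by omega)
        refine ⟨by omega, p2, ?_, p4⟩
        intro k hk1 hk2
        by_cases hkm : (k : Int) ≤ mid
        · have hkn : k ≤ mid.toNat := by omega
          have := hm k mid.toNat hkn (by omega)
          rw [hget] at hcmp
          omega
        · exact p3 k (by omega) hk2
      · rw [if_neg hcmp]
        obtain ⟨p1, p2, p3, p4⟩ := IH lo mid (by omega) h0 (by omega) (by omega)
        refine ⟨p1, by omega, p3, ?_⟩
        intro _
        by_cases hres : bisectLeft data x fuel lo mid < mid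
        · exact p4 hres
        · have : bisectLeft data x fuel lo mid = mid := by omega
          rw [this, ← hget]
          omega
    · rw [if_neg hlt]
      exact ⟨le_refl lo, by omega, fun k hk1 hk2 => by omega, fun h => by omega⟩

-- one bisect jump of A from a valid index, for gap m ≥ 1
theorem jmp_spec (data : List Int) (m r : Int) (hm : Mono data) (h1 : 1 ≤ m)
    (h0 : 0 ≤ r) (hr : r < (data.length : Int)) :
    r < bisectLeft data (PySem.List.pyGetD data r 0 + m) ((data.length : Int) - r).toNat r (data.length : Int) ∧
    bisectLeft data (PySem.List.pyGetD data r 0 + m) ((data.length : Int) - r).toNat r (data.length : Int) ≤ (data.length : Int) ∧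
    (∀ k : Nat, r ≤ (k : Int) →
      (k : Int) < bisectLeft data (PySem.List.pyGetD data r 0 + m) ((data.length : Int) - r).toNat r (data.length : Int) →
      data.getD k 0 < data.getD r.toNat 0 + m) ∧
    (bisectLeft data (PySem.List.pyGetD data r 0 + m) ((data.length : Int) - r).toNat r (data.length : Int) < (data.length : Int) →
      data.getD r.toNat 0 + m ≤
        data.getD (bisectLeft data (PySem.List.pyGetD data r 0 + m) ((data.length : Int) - r).toNat r (data.length : Int)).toNat 0) := by
  have hget : PySem.List.pyGetD data r 0 = data.getD r.toNat 0 := pyGetD_getD data r h0 hr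
  obtain ⟨p1, p2, p3, p4⟩ := bl_spec data (PySem.List.pyGetD data r 0 + m) hm
    ((data.length : Int) - r).toNat r (data.length : Int) (le_refl _) h0 (le_refl _) (by omega)
  refine ⟨?_, p2, by rw [← hget]; exact p3, by rw [← hget]; exact p4⟩
  rcases lt_or_eq_of_le p1 with h | h
  · exact h
  · exfalso
    have hlt := p4 (by omega)
    rw [← h] at hlt
    have : r.toNat < data.length := by omega
    rw [hget] at hlt
    omega

-- one bisect jump from a valid index strictly advances (for gap ≥ 1)
-- greedy scan: shifting the accumulator
theorem greedy_shift (m : Int) (l : List Int) (last cnt d : Int) :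
    greedyB m l last (cnt + d) = greedyB m l last cnt + d := by
  induction l generalizing last cnt with
  | nil => simp [greedyB]
  | cons x xs ih =>
    simp only [greedyB]
    split
    · have h : cnt + d + 1 = cnt + 1 + d := by ring
      rw [h]; exact ih x (cnt + 1)
    · exact ih _ _

theorem greedy_nonneg (m : Int) (l : List Int) (last cnt : Int) :
    cnt ≤ greedyB m l last cnt := by
  induction l generalizing last cnt with
  | nil => simp [greedyB]
  | cons x xs ih =>
    simp only [greedyB]; split
    · exact le_trans (by omega) (ih x (cnt + 1))
    · exact ih _ _

theorem greedy_bound (m : Int) (l : List Int) (last cnt : Int) :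
    greedyB m l last cnt ≤ cnt + l.length := by
  induction l generalizing last cnt with
  | nil => simp [greedyB]
  | cons x xs ih =>
    simp only [greedyB, List.length_cons]; split
    · have h := ih x (cnt + 1); push_cast at h ⊢; omega
    · have h := ih last cnt; push_cast at h ⊢; omega

-- greedy skips a block of rejected elements
theorem greedy_skip (data : List Int) (m last cnt : Int) (i e : Nat)
    (hie : i ≤ e) (hen : e ≤ data.length)
    (hrej : ∀ k : Nat, i ≤ k → k < e → data.getD k 0 - last < m) :
    greedyB m (data.drop i) last cnt = greedyB m (data.drop e) last cnt := by
  have H : ∀ (d i : Nat), i ≤ e → e - i = d →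
      (∀ k : Nat, i ≤ k → k < e → data.getD k 0 - last < m) →
      greedyB m (data.drop i) last cnt = greedyB m (data.drop e) last cnt := by
    intro d
    induction d with
    | zero =>
      intro i h1 h2 _
      have : i = e := by omega
      rw [this]
    | succ d ih =>
      intro i h1 h2 hrej
      have hie' : i < e := by omega
      have hin : i < data.length := by omega
      rw [List.drop_eq_getElem_cons hin]
      simp only [greedyB]
      have hr := hrej i (le_refl i) hie'
      rw [List.getD_eq_getElem data 0 hin] at hr
      rw [if_neg (by omega)]
      exact ih (i + 1) (by omega) (by omega) (fun k hk1 hk2 => hrej k (by omega) hk2)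
  exact H (e - i) i hie rfl hrej

-- gap m = 0 on a sorted list accepts every element
theorem greedy_all : ∀ (l : List Int) (last cnt : Int),
    List.Pairwise (· ≤ ·) l → (∀ x ∈ l, last ≤ x) →
    greedyB 0 l last cnt = cnt + l.length
  | [], last, cnt, _, _ => by simp [greedyB]
  | x :: xs, last, cnt, hs, hle => by
    simp only [greedyB]
    have h0 : (0 : Int) ≤ x - last := by have := hle x (by simp); omega
    rw [if_pos h0,
      greedy_all xs x (cnt + 1) hs.of_cons (fun y hy => List.rel_of_pairwise_cons hs hy)]
    simp; omega

-- additional routers placed by the greedy scan strictly after index r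
def gCount (data : List Int) (m : Int) (r : Nat) : Int :=
  greedyB m (data.drop (r + 1)) (data.getD r 0) 0

-- the bisect chain of A survives fuel jumps from r iff the greedy scan places < fuel more routers
theorem chase_iff_greedy (data : List Int) (m : Int) (hm : Mono data) (h1 : 1 ≤ m) :
    ∀ (fuel : Nat) (r : Int), 0 ≤ r → r < (data.length : Int) →
    ((data.length : Int) ≤ chaseA data m fuel r ↔ gCount data m r.toNat < (fuel : Int)) := by
  intro fuel
  induction fuel with
  | zero =>
    intro r h0 hr
    have hg : 0 ≤ gCount data m r.toNat := by
      unfold gCount; exact greedy_nonneg m _ _ 0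
    simp only [chaseA]
    constructor <;> intro h <;> [omega; omega]
  | succ fuel ih =>
    intro r h0 hr
    obtain ⟨j1, j2, j3, j4⟩ := jmp_spec data m r hm h1 h0 hr
    simp only [chaseA]
    by_cases hjn : (data.length : Int) ≤
        bisectLeft data (PySem.List.pyGetD data r 0 + m) ((data.length : Int) - r).toNat r (data.length : Int)
    · rw [if_pos hjn]
      have hg0 : gCount data m r.toNat = 0 := by
        unfold gCount
        rw [greedy_skip data m (data.getD r.toNat 0) 0 (r.toNat + 1) data.length
          (by omega) (le_refl _)
          (fun k hk1 hk2 => by have := j3 k (by omega) (by omega); omega)]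
        simp [greedyB]
      rw [hg0]
      constructor <;> intro _ <;> [push_cast; skip] <;> omega
    · rw [if_neg hjn]
      set j := bisectLeft data (PySem.List.pyGetD data r 0 + m) ((data.length : Int) - r).toNat r (data.length : Int) with hjdef
      have hjlt : j < (data.length : Int) := by omega
      have hjn' : j.toNat < data.length := by omega
      have hstep : gCount data m r.toNat = 1 + gCount data m j.toNat := by
        unfold gCount
        rw [greedy_skip data m (data.getD r.toNat 0) 0 (r.toNat + 1) j.toNat
          (by omega) (by omega)
          (fun k hk1 hk2 => by have := j3 k (by omega) (by omega); omega)]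
        rw [List.drop_eq_getElem_cons hjn']
        simp only [greedyB]
        have hacc := j4 hjlt
        rw [if_pos (by rw [List.getD_eq_getElem data 0 hjn'] at hacc; omega)]
        rw [← List.getD_eq_getElem data 0 hjn', greedy_shift]
        omega
      have hiff := ih j (by omega) hjlt
      rw [hstep]
      rw [hiff] at *
      push_cast
      omega

-- at gap 0 the chain never advances
theorem chase_zero (data : List Int) (hm : Mono data) (hne : data ≠ []) :
    ∀ fuel : Nat, chaseA data 0 fuel 0 = 0 := by
  have hn : 0 < data.length := List.length_pos_iff.mpr hne
  have hj0 : bisectLeft data (PySem.List.pyGetD data 0 0 + 0)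
      ((data.length : Int) - 0).toNat 0 (data.length : Int) = 0 := by
    obtain ⟨p1, p2, p3, p4⟩ := bl_spec data (PySem.List.pyGetD data 0 0 + 0) hm
      ((data.length : Int) - 0).toNat 0 (data.length : Int) (le_refl _) (le_refl 0) (le_refl _)
      (by exact_mod_cast Nat.zero_le _)
    by_contra hne0
    have h1 : (0 : Int) < bisectLeft data (PySem.List.pyGetD data 0 0 + 0)
        ((data.length : Int) - 0).toNat 0 (data.length : Int) := by
      omega
    have := p3 0 (le_refl 0) (by exact_mod_cast h1)
    rw [pyGetD_getD data 0 (le_refl 0) (by exact_mod_cast hn)] at this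
    simp at this
  intro fuel
  induction fuel with
  | zero => rfl
  | succ fuel ih =>
    simp only [chaseA, hj0]
    rw [if_neg (by omega)]
    exact ih

-- countB in terms of gCount (nonempty list)
theorem countB_eq (data : List Int) (m : Int) (hne : data ≠ []) :
    countB data m = 1 + gCount data m 0 := by
  unfold countB gCount
  rw [PySem.List.slice_from_one, ← List.drop_one, PySem.List.pyGet?_zero,
    ← List.getD_eq_getElem?_getD]
  have h := greedy_shift m (data.drop 1) (data.getD 0 0) 0 1
  simp only [zero_add, Nat.zero_add] at h ⊢
  omega

-- feasibility predicates agree for every midpoint when c ≤ n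
theorem feas_agree (data : List Int) (c : Int) (hm : Mono data)
    (hs : List.Pairwise (· ≤ ·) data) (hne : data ≠ []) (hc : c ≤ (data.length : Int)) :
    ∀ m : Int, 0 ≤ m →
      ((data.length : Int) ≤ chaseA data m (c - 1).toNat 0 ↔ countB data m < c) := by
  intro m hm0
  have hn : 0 < data.length := List.length_pos_iff.mpr hne
  by_cases h1 : 1 ≤ m
  · have hiff := chase_iff_greedy data m hm h1 (c - 1).toNat 0 (le_refl 0)
      (by exact_mod_cast hn)
    have hg : 0 ≤ gCount data m (0 : Int).toNat := by
      unfold gCount; exact greedy_nonneg m _ _ 0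
    rw [countB_eq data m hne, hiff]
    have ht : (0 : Int).toNat = 0 := rfl
    rw [ht] at hg ⊢
    omega
  · have hm0' : m = 0 := by omega
    subst hm0'
    rw [chase_zero data hm hne]
    cases data with
    | nil => exact absurd rfl hne
    | cons d rest =>
      have hcount : countB (d :: rest) 0 = 1 + (rest.length : Int) := by
        unfold countB
        rw [PySem.List.slice_from_one]
        simp only [List.tail_cons, PySem.List.pyGet?_zero_cons, Option.getD_some]
        exact greedy_all rest d 1 hs.of_cons (fun y hy => List.rel_of_pairwise_cons hs hy)
      rw [hcount]
      simp only [List.length_cons] at hc hn ⊢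
      push_cast at hc ⊢
      constructor <;> intro h <;> omega

-- the two binary searches coincide once the feasibility tests agree
theorem loops_eq (data : List Int) (c : Int)
    (hfe : ∀ m : Int, 0 ≤ m →
      ((data.length : Int) ≤ chaseA data m (c - 1).toNat 0 ↔ countB data m < c)) :
    ∀ (fuel : Nat) (s e a : Int), (e + 1 - s).toNat ≤ fuel → 0 ≤ s →
    loopA data c fuel s e a = loopB data c fuel s e a := by
  intro fuel
  induction fuel with
  | zero => intro s e a _ _; rfl
  | succ fuel IH =>
    intro s e a hf hs
    simp only [loopA, loopB]
    by_cases hse : s ≤ e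
    · rw [if_pos hse, if_pos hse]
      have hb := PySem.Int.floordiv_two_mid_bounds hse
      have hiff := hfe (PySem.Int.floordiv (s + e) 2) (by omega)
      by_cases hA : (data.length : Int) ≤
          chaseA data (PySem.Int.floordiv (s + e) 2) (c - 1).toNat 0
      · rw [if_pos hA, if_neg (by rw [hiff] at hA; omega)]
        exact IH s _ a (by omega) hs
      · rw [if_neg hA, if_pos (by rw [hiff] at hA; omega)]
        exact IH _ e _ (by omega) (by omega)
    · rw [if_neg hse, if_neg hse]

theorem loopA_zero (data : List Int) (c : Int) (hm : Mono data) (hne : data ≠ [])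
    (hc : (data.length : Int) < c) :
    ∀ (fuel : Nat) (s e : Int), 0 ≤ s → loopA data c fuel s e 0 = 0 := by
  have hn : 0 < data.length := List.length_pos_iff.mpr hne
  intro fuel
  induction fuel with
  | zero => intro s e _; rfl
  | succ fuel IH =>
    intro s e hs
    simp only [loopA]
    by_cases hse : s ≤ e
    · rw [if_pos hse]
      have hb := PySem.Int.floordiv_two_mid_bounds hse
      by_cases h1 : 1 ≤ PySem.Int.floordiv (s + e) 2
      · have hA : (data.length : Int) ≤
            chaseA data (PySem.Int.floordiv (s + e) 2) (c - 1).toNat 0 := by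
          rw [chase_iff_greedy data _ hm h1 (c - 1).toNat 0 (le_refl 0)
            (by exact_mod_cast hn)]
          have hgb : gCount data (PySem.Int.floordiv (s + e) 2) (0 : Int).toNat ≤
              ((data.drop 1).length : Int) := by
            unfold gCount
            exact le_trans (greedy_bound _ _ _ 0) (by norm_num)
          rw [List.length_drop] at hgb
          omega
        rw [if_pos hA]
        exact IH s _ hs
      · have hm0 : PySem.Int.floordiv (s + e) 2 = 0 := by omega
        rw [hm0]
        rw [chase_zero data hm hne]
        rw [if_neg (by omega)]
        exact IH _ e (by omega)
    · rw [if_neg hse]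

theorem loopB_zero (data : List Int) (c : Int) (hc : ∀ m : Int, countB data m < c) :
    ∀ (fuel : Nat) (s e : Int), loopB data c fuel s e 0 = 0 := by
  intro fuel
  induction fuel with
  | zero => intro s e; rfl
  | succ fuel IH =>
    intro s e
    simp only [loopB]
    by_cases hse : s ≤ e
    · rw [if_pos hse, if_neg (by have := hc (PySem.Int.floordiv (s + e) 2); omega)]
      exact IH s _
    · rw [if_neg hse]

-- ===== VERDICT (by name: the statement is the Claim_ definition above) =====
theorem solve_spec : Claim_equal_solve := by
  intro data c _hdom hpre
  obtain ⟨hne, hcase⟩ := hpre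
  cases hcase with
  | inl hs =>
    have hm := mono_of_pairwise data hs
    unfold Spec_solve solve solve_alt
    by_cases hc : c ≤ (data.length : Int)
    · exact loops_eq data c (feas_agree data c hm hs hne hc) _ 0 _ 0 (le_refl _) (le_refl 0)
    · push_neg at hc
      rw [loopA_zero data c hm hne hc _ 0 _ (le_refl 0)]
      have hn1 : 1 ≤ data.length := List.length_pos_iff.mpr hne
      rw [loopB_zero data c (fun m => by
        have h1 := greedy_bound m (PySem.List.slice data (some 1) none) ((PySem.List.pyGet? data 0).getD 0) 1
        have h2 : (PySem.List.slice data (some 1) none).length = data.length - 1 := by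
          rw [PySem.List.slice_from_one]; simp
        unfold countB
        rw [h2] at h1
        have : ((data.length - 1 : Nat) : Int) = (data.length : Int) - 1 := by omega
        omega) _ 0 _]
  | inr hlt =>
    -- negative span: the while loop of both programs never runs, both return 0
    unfold Spec_solve solve solve_alt
    have hA : ∀ x : Int, x < 0 → loopA data c (x + 1 - 0).toNat 0 x 0 = 0 := by
      intro x hx
      have hf : (x + 1 - 0).toNat = 0 := by omega
      rw [hf]
      rfl
    have hB : ∀ x : Int, x < 0 → loopB data c (x + 1 - 0).toNat 0 x 0 = 0 := by
      intro x hx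
      have hf : (x + 1 - 0).toNat = 0 := by omega
      rw [hf]
      rfl
    rw [hA _ (by omega), hB _ (by omega)]
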